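-- pv_equiv track=rewrite | github.com/dudepare/topcoder | quorum.py | count
-- ===== SOURCE A (Python) =====
-- def count(arr, n):
-- 	arr.sort()
-- 	i = 0
-- 	ans = 0
-- 	while i < n:
-- 		ans += arr[i]
-- 		i += 1
-- 	return ans
-- ===== SOURCE B (Python) =====
-- def count(arr, n):
--     # Sum of the n smallest elements via three-way quickselect partitioning
--     # (no full sort; A additionally sorts arr in place, B leaves it unchanged).
--     if n <= 0:
--         return 0
--     return _sel(arr, n)
--
-- def _lt(xs, p):
--     return [x for x in xs if x < p]
--
-- def _eq(xs, p):
--     return [x for x in xs if x == p]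
--
-- def _gt(xs, p):
--     return [x for x in xs if x > p]
--
-- def _sel(xs, k):
--     # sum of the k smallest elements of xs, assuming 0 <= k <= len(xs)
--     if k == len(xs):
--         return sum(xs)
--     p = xs[len(xs) // 2]
--     lo, eq, hi = _lt(xs, p), _eq(xs, p), _gt(xs, p)
--     if k <= len(lo):
--         return _sel(lo, k)
--     if k <= len(lo) + len(eq):
--         return sum(lo) + p * (k - len(lo))
--     return sum(lo) + sum(eq) + _sel(hi, k - len(lo) - len(eq))
-- ===== Notes on version B (the rewrite author's own statement) =====
-- stated objective: alternative
-- what changed: Replaces full in-place sort + index loop with a recursive three-way quickselect partition that sums the n smallest elements without sorting (B also leaves arr unmutated; return values agree).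
import Mathlib
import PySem

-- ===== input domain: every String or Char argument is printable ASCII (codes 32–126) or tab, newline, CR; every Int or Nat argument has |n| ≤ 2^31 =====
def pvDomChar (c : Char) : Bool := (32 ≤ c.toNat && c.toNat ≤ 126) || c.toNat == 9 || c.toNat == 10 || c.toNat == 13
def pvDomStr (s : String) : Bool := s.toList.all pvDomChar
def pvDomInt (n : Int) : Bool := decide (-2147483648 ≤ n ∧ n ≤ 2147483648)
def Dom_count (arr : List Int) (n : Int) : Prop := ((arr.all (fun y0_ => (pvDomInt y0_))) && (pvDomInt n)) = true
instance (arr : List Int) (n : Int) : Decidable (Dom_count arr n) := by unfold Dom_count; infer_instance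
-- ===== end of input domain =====

-- B replaces A's full in-place sort + index loop with a recursive three-way quickselect
-- partition; equivalence is about the RETURN value only: A sorts arr in place, B does not.


-- ===== PORT A =====
-- 'while i < n: ans += arr[i]; i += 1' on the sorted list
def countLoop (s : List Int) (n : Int) (i : Int) (ans : Int) : Int :=
  if _h : i < n then
    match PySem.List.pyGet? s i with
    | some v => countLoop s n (i + 1) (ans + v)
    | none => ans   -- IndexError in Python; excluded by Pre_count
  else ans
termination_by (n - i).toNat
decreasing_by omega

def count (arr : List Int) (n : Int) : Int :=
  countLoop (PySem.List.sorted arr (fun x => x) false) n 0 0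

-- ===== PORT B =====
-- the three partition comprehensions _lt/_eq/_gt of Source B
def partLt (xs : List Int) (p : Int) : List Int := xs.filter (fun x => decide (x < p))
def partEq (xs : List Int) (p : Int) : List Int := xs.filter (fun x => decide (x = p))
def partGt (xs : List Int) (p : Int) : List Int := xs.filter (fun x => decide (p < x))

-- termination facts for _sel's recursion (cited by name in decreasing_by)
theorem partLt_length_lt (xs : List Int) (p : Int) (hp : p ∈ xs) :
    (partLt xs p).length < xs.length :=
  List.length_filter_lt_length_iff_exists.2 ⟨p, hp, by simp⟩

theorem partGt_length_lt (xs : List Int) (p : Int) (hp : p ∈ xs) :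
    (partGt xs p).length < xs.length :=
  List.length_filter_lt_length_iff_exists.2 ⟨p, hp, by simp⟩

-- helper _sel: sum of the k smallest elements of xs via three-way partition
def sel (xs : List Int) (k : Int) : Int :=
  if k = (xs.length : Int) then xs.sum
  else
    match hp : PySem.List.pyGet? xs (PySem.Int.floordiv (xs.length : Int) 2) with
    | none => 0   -- IndexError in Python; excluded by Pre_count
    | some p =>
      if k ≤ ((partLt xs p).length : Int) then sel (partLt xs p) k
      else if k ≤ ((partLt xs p).length : Int) + ((partEq xs p).length : Int) then
        (partLt xs p).sum + p * (k - ((partLt xs p).length : Int))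
      else
        (partLt xs p).sum + (partEq xs p).sum +
          sel (partGt xs p) (k - ((partLt xs p).length : Int) - ((partEq xs p).length : Int))
termination_by xs.length
decreasing_by
  · exact partLt_length_lt xs p (PySem.List.mem_of_pyGet?_eq_some xs hp)
  · exact partGt_length_lt xs p (PySem.List.mem_of_pyGet?_eq_some xs hp)

def count_alt (arr : List Int) (n : Int) : Int :=
  if n ≤ 0 then 0 else sel arr n

-- ===== PRECONDITION & SPEC =====
-- Pre_count excludes exactly the inputs with n > len(arr), on which A raises IndexError.
def Pre_count (arr : List Int) (n : Int) : Prop := n ≤ (arr.length : Int)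
instance (arr : List Int) (n : Int) : Decidable (Pre_count arr n) := by unfold Pre_count; infer_instance
def pvWitness_count : List Int × Int := ([3, 1, 2], 2)

def Spec_count (arr : List Int) (n : Int) (out : Int) : Prop := out = count_alt arr n
instance (arr : List Int) (n : Int) (out : Int) : Decidable (Spec_count arr n out) := by unfold Spec_count; infer_instance

-- ===== CLAIM (what is proved, stated in full; the proofs are below) =====
def Claim_equal_count : Prop := ∀ (arr : List Int) (n : Int), Dom_count arr n → Pre_count arr n → Spec_count arr n (count arr n)

-- ===== LEMMAS AND PROOFS =====

-- A's loop sums the slice s[i:n]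
theorem countLoop_eq (s : List Int) (n i ans : Int) (h0 : 0 ≤ i) (hn : n ≤ (s.length : Int)) :
    countLoop s n i ans = ans + (((s.drop i.toNat).take (n - i).toNat).sum) := by
  rw [countLoop]
  split
  · rename_i hlt
    have hi : i.toNat < s.length := by omega
    rw [PySem.List.pyGet?_eq_some_getElem s h0 (by omega)]
    dsimp only
    rw [countLoop_eq s n (i + 1) _ (by omega) hn]
    rw [List.drop_eq_getElem_cons hi]
    have h1 : (n - i).toNat = ((n - (i + 1)).toNat) + 1 := by omega
    have h2 : i.toNat + 1 = (i + 1).toNat := by omega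
    rw [h1, List.take_succ_cons, List.sum_cons, h2]
    ring
  · rename_i hge
    have : (n - i).toNat = 0 := by omega
    simp [this]
termination_by (n - i).toNat
decreasing_by omega

theorem partition_perm (xs : List Int) (p : Int) :
    (partLt xs p ++ partEq xs p ++ partGt xs p).Perm xs := by
  induction xs with
  | nil => simp [partLt, partEq, partGt]
  | cons a t ih =>
    rcases lt_trichotomy a p with h1 | h1 | h1
    · have e1 : partLt (a :: t) p = a :: partLt t p := by
        simp [partLt, h1]
      have e2 : partEq (a :: t) p = partEq t p := by
        simp [partEq, (show ¬ a = p by omega)]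
      have e3 : partGt (a :: t) p = partGt t p := by
        simp [partGt, (show ¬ p < a by omega)]
      rw [e1, e2, e3]
      simpa using ih.cons a
    · have e1 : partLt (a :: t) p = partLt t p := by
        simp [partLt, (show ¬ a < p by omega)]
      have e2 : partEq (a :: t) p = a :: partEq t p := by
        simp [partEq, h1]
      have e3 : partGt (a :: t) p = partGt t p := by
        simp [partGt, (show ¬ p < a by omega)]
      rw [e1, e2, e3]
      have e4 : partLt t p ++ a :: partEq t p ++ partGt t p
          = partLt t p ++ a :: (partEq t p ++ partGt t p) := by
        simp
      rw [e4]
      exact List.perm_middle.trans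
        ((by simpa [List.append_assoc] using ih :
          (partLt t p ++ (partEq t p ++ partGt t p)).Perm t).cons a)
    · have e1 : partLt (a :: t) p = partLt t p := by
        simp [partLt, (show ¬ a < p by omega)]
      have e2 : partEq (a :: t) p = partEq t p := by
        simp [partEq, (show ¬ a = p by omega)]
      have e3 : partGt (a :: t) p = a :: partGt t p := by
        simp [partGt, h1]
      rw [e1, e2, e3]
      exact List.perm_middle.trans
        ((by simpa [List.append_assoc] using ih :
          ((partLt t p ++ partEq t p) ++ partGt t p).Perm t).cons a)

-- take j of a constant-p list sums to j * p
theorem take_const_sum (l : List Int) (p : Int) (hl : ∀ x ∈ l, x = p) (j : Nat) (hj : j ≤ l.length) :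
    (l.take j).sum = (j : Int) * p := by
  induction l generalizing j with
  | nil => simp at hj; simp [hj]
  | cons a t ih =>
    cases j with
    | zero => simp
    | succ m =>
      have ha := hl a (by simp)
      rw [List.take_succ_cons, List.sum_cons,
        ih (fun x hx => hl x (by simp [hx])) m (by simpa using hj), ha]
      push_cast; ring

-- the sorted list is exactly sorted lo ++ eq ++ sorted hi
theorem sorted_partition (xs : List Int) (p : Int) :
    PySem.List.sorted xs (fun x => x) false
      = PySem.List.sorted (partLt xs p) (fun x => x) false ++ partEq xs p
        ++ PySem.List.sorted (partGt xs p) (fun x => x) false := by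
  apply PySem.List.sorted_id_eq_of_perm_of_pairwise
  · exact ((PySem.List.sorted_perm _ _ _).append
      (List.Perm.refl _)).append (PySem.List.sorted_perm _ _ _) |>.trans (partition_perm xs p)
  · have hlo : ∀ x ∈ PySem.List.sorted (partLt xs p) (fun x => x) false, x < p := by
      intro x hx
      have hx' : x ∈ partLt xs p := (PySem.List.mem_sorted _ _ _ _).1 hx
      simp only [partLt, List.mem_filter, decide_eq_true_eq] at hx'
      exact hx'.2
    have heq : ∀ x ∈ partEq xs p, x = p := by
      intro x hx
      simp only [partEq, List.mem_filter, decide_eq_true_eq] at hx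
      exact hx.2
    have hhi : ∀ x ∈ PySem.List.sorted (partGt xs p) (fun x => x) false, p < x := by
      intro x hx
      have hx' : x ∈ partGt xs p := (PySem.List.mem_sorted _ _ _ _).1 hx
      simp only [partGt, List.mem_filter, decide_eq_true_eq] at hx'
      exact hx'.2
    rw [List.pairwise_append]
    refine ⟨?_, ?_, ?_⟩
    · rw [List.pairwise_append]
      refine ⟨by simpa using PySem.List.sorted_pairwise (partLt xs p) (fun x => x), ?_, ?_⟩
      · exact List.pairwise_of_forall_mem_list (fun a ha b hb => by rw [heq a ha, heq b hb])
      · intro a ha b hb; have := hlo a ha; have := heq b hb; omega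
    · simpa using PySem.List.sorted_pairwise (partGt xs p) (fun x => x)
    · intro a ha b hb
      have hb' := hhi b hb
      rcases List.mem_append.1 ha with h | h
      · have := hlo a h; omega
      · have := heq a h; omega

-- _sel computes the sum of the first k elements of the sorted list
theorem sel_eq (xs : List Int) (k : Int) (h0 : 0 ≤ k) (hk : k ≤ (xs.length : Int)) :
    sel xs k = ((PySem.List.sorted xs (fun x => x) false).take k.toNat).sum := by
  rw [sel]
  split
  · rename_i hlen
    have h1 : xs.length ≤ k.toNat := by omega
    rw [List.take_of_length_le (by rw [PySem.List.length_sorted]; exact h1)]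
    exact ((PySem.List.sorted_perm xs (fun x => x) false).sum_eq).symm
  · rename_i hlen
    have hpos : 0 < xs.length := by omega
    split
    · rename_i hp
      exfalso
      rw [PySem.Int.floordiv_eq_ediv_of_pos (by omega)] at hp
      rw [PySem.List.pyGet?_eq_some_getElem xs (by omega) (by omega)] at hp
      simp at hp
    · rename_i p hp
      have hpmem : p ∈ xs := PySem.List.mem_of_pyGet?_eq_some xs hp
      have hlen3 : (partLt xs p ++ partEq xs p ++ partGt xs p).length = xs.length :=
        (partition_perm xs p).length_eq
      simp only [List.length_append] at hlen3
      have hsp := sorted_partition xs p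
      have hLlen : (PySem.List.sorted (partLt xs p) (fun x => x) false).length
          = (partLt xs p).length := PySem.List.length_sorted _ _ _
      have hLsum : (PySem.List.sorted (partLt xs p) (fun x => x) false).sum
          = (partLt xs p).sum := (PySem.List.sorted_perm _ _ _).sum_eq
      have heq : ∀ x ∈ partEq xs p, x = p := by
        intro x hx
        simp only [partEq, List.mem_filter, decide_eq_true_eq] at hx
        exact hx.2
      split
      · rename_i hk1
        rw [sel_eq (partLt xs p) k h0 hk1, hsp,
          List.take_append_of_le_length (by simp [hLlen]; omega),
          List.take_append_of_le_length (by rw [hLlen]; omega)]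
      · rename_i hk1
        split
        · rename_i hk2
          rw [hsp, List.take_append_of_le_length (by simp [hLlen]; omega),
            List.take_append,
            List.take_of_length_le (by rw [hLlen]; omega)]
          rw [List.sum_append, hLsum, hLlen,
            take_const_sum (partEq xs p) p heq (k.toNat - (partLt xs p).length) (by omega)]
          have hc : (((k.toNat - (partLt xs p).length) : Nat) : Int)
              = k - ((partLt xs p).length : Int) := by omega
          rw [hc]; ring
        · rename_i hk2
          have hkG0 : 0 ≤ k - ((partLt xs p).length : Int) - ((partEq xs p).length : Int) := by omega
          have hkG1 : k - ((partLt xs p).length : Int) - ((partEq xs p).length : Int)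
              ≤ ((partGt xs p).length : Int) := by omega
          rw [sel_eq (partGt xs p) _ hkG0 hkG1, hsp, List.take_append]
          have e5 : List.take k.toNat
                ((PySem.List.sorted (partLt xs p) (fun x => x) false) ++ partEq xs p)
              = (PySem.List.sorted (partLt xs p) (fun x => x) false) ++ partEq xs p :=
            List.take_of_length_le (by rw [List.length_append, hLlen]; omega)
          rw [e5]
          simp only [List.sum_append, List.length_append, hLsum, hLlen]
          have hjs : (k - ((partLt xs p).length : Int) - ((partEq xs p).length : Int)).toNat
              = k.toNat - ((partLt xs p).length + (partEq xs p).length) := by omega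
          rw [hjs]
termination_by xs.length
decreasing_by
  all_goals first
  | exact partLt_length_lt _ _ (PySem.List.mem_of_pyGet?_eq_some _ (by assumption))
  | exact partGt_length_lt _ _ (PySem.List.mem_of_pyGet?_eq_some _ (by assumption))

-- ===== VERDICT (by name: the statement is the Claim_ definition above) =====
theorem count_spec : Claim_equal_count := by
  intro arr n _ hpre
  unfold Spec_count count count_alt
  rw [countLoop_eq _ n 0 0 (le_refl _) (by simpa [PySem.List.length_sorted] using hpre)]
  split
  · rename_i hn
    have h2 : n.toNat = 0 := by omega
    simp [h2]
  · rename_i hn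
    rw [sel_eq arr n (by omega) hpre]
    simp
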